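-- pv_equiv track=rewrite | github.com/kyshen/sketch_tnc | src/runner/io.py | _resolved_columns
-- ===== SOURCE A (Python) =====
-- from typing import Any, Iterable
--
-- RESULT_COLUMNS = [
--     "family",
--     "instance",
--     "topology",
--     "size_description",
--     "method",
--     "method_variant",
--     "status",
--     "seed",
--     "rel_error",
--     "RMSE",
--     "NMSE",
--     "NMSE_dB",
--     "contract_time_sec",
--     "emit_time_sec",
--     "total_time_sec",
--     "speedup_vs_exact",
--     "t_contract_ratio",
--     "num_blocks",
--     "refined_blocks",
--     "mean_rank",
--     "max_rank",
--     "peak_rank",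
--     "num_exact_merges",
--     "num_compressed_merges",
--     "num_exact_leaves",
--     "num_compressed_leaves",
--     "mean_leaf_residual_ratio",
--     "mean_merge_residual_ratio",
--     "cache_enabled",
--     "cache_requests",
--     "cache_hits",
--     "cache_misses",
--     "cache_hit_rate",
--     "num_cached_states",
--     "leaf_states_built",
--     "internal_states_built",
--     "num_implicit_merge_sketches",
--     "num_explicit_merge_compressions",
--     "skipped_small_rank_merges",
--     "skipped_small_state_merges",
--     "skipped_low_saving_merges",
--     "exact_total_time_sec",
--     "reference_available",
--     "num_method_params",
--     "nmse",
--     "total_time",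
--     "contraction_time",
--     "emission_time",
--     "speedup",
--     "tau",
--     "fixed_rank",
--     "oversampling",
--     "power_iter",
--     "rank_policy",
--     "leaf_tol",
--     "merge_tol",
--     "target_rank",
--     "max_rank",
--     "error_message",
-- ]
--
-- def _resolved_columns(rows: list[dict[str, Any]]) -> list[str]:
--     ordered = list(RESULT_COLUMNS)
--     seen = set(ordered)
--     extra = []
--     for row in rows:
--         for key in row.keys():
--             if key not in seen:
--                 seen.add(key)
--                 extra.append(key)
--     return ordered + sorted(extra)
-- ===== SOURCE B (Python) =====
-- from typing import Any
--
-- RESULT_COLUMNS = [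
--     "family",
--     "instance",
--     "topology",
--     "size_description",
--     "method",
--     "method_variant",
--     "status",
--     "seed",
--     "rel_error",
--     "RMSE",
--     "NMSE",
--     "NMSE_dB",
--     "contract_time_sec",
--     "emit_time_sec",
--     "total_time_sec",
--     "speedup_vs_exact",
--     "t_contract_ratio",
--     "num_blocks",
--     "refined_blocks",
--     "mean_rank",
--     "max_rank",
--     "peak_rank",
--     "num_exact_merges",
--     "num_compressed_merges",
--     "num_exact_leaves",
--     "num_compressed_leaves",
--     "mean_leaf_residual_ratio",
--     "mean_merge_residual_ratio",
--     "cache_enabled",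
--     "cache_requests",
--     "cache_hits",
--     "cache_misses",
--     "cache_hit_rate",
--     "num_cached_states",
--     "leaf_states_built",
--     "internal_states_built",
--     "num_implicit_merge_sketches",
--     "num_explicit_merge_compressions",
--     "skipped_small_rank_merges",
--     "skipped_small_state_merges",
--     "skipped_low_saving_merges",
--     "exact_total_time_sec",
--     "reference_available",
--     "num_method_params",
--     "nmse",
--     "total_time",
--     "contraction_time",
--     "emission_time",
--     "speedup",
--     "tau",
--     "fixed_rank",
--     "oversampling",
--     "power_iter",
--     "rank_policy",
--     "leaf_tol",
--     "merge_tol",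
--     "target_rank",
--     "max_rank",
--     "error_message",
-- ]
--
--
-- def _resolved_columns(rows: list[dict[str, Any]]) -> list[str]:
--     # Sort the raw concatenation of all row keys first, then remove duplicates
--     # and base columns in one adjacent-comparison scan: no 'seen' set, no
--     # ordered extras accumulator, no final sort.
--     base = set(RESULT_COLUMNS)
--     keys = sorted(k for row in rows for k in row.keys())
--     extras: list[str] = []
--     for k in keys:
--         if k not in base and (not extras or extras[-1] != k):
--             extras.append(k)
--     return list(RESULT_COLUMNS) + extras
-- ===== Notes on version B (the rewrite author's own statement) =====
-- stated objective: alternative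
-- what changed: B sorts the raw concatenation of all row keys first and eliminates duplicates by adjacent comparison (extras[-1] != k) plus a base-set membership test in one scan, replacing A's first-seen 'seen'-set accumulator followed by a final sort.
import Mathlib
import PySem

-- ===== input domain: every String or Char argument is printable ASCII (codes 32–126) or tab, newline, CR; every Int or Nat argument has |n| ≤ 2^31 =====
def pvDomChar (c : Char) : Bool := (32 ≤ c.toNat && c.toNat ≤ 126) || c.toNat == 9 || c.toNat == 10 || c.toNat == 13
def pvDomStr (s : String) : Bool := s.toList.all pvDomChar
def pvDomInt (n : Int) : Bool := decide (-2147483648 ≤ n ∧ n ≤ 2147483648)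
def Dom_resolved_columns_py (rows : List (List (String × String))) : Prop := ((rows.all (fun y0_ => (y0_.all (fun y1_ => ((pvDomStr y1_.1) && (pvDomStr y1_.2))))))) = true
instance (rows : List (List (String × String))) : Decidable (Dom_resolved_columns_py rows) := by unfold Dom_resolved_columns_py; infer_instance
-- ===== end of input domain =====

-- B replaces A's seen-set + ordered extras accumulator + final sort by sorting the raw
-- concatenation of all row keys first and deduplicating by adjacent comparison in one scan;
-- objective: alternative decomposition, same result.

def RESULT_COLUMNS : List String := [
  "family", "instance", "topology", "size_description", "method", "method_variant",
  "status", "seed", "rel_error", "RMSE", "NMSE", "NMSE_dB", "contract_time_sec",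
  "emit_time_sec", "total_time_sec", "speedup_vs_exact", "t_contract_ratio",
  "num_blocks", "refined_blocks", "mean_rank", "max_rank", "peak_rank",
  "num_exact_merges", "num_compressed_merges", "num_exact_leaves",
  "num_compressed_leaves", "mean_leaf_residual_ratio", "mean_merge_residual_ratio",
  "cache_enabled", "cache_requests", "cache_hits", "cache_misses", "cache_hit_rate",
  "num_cached_states", "leaf_states_built", "internal_states_built",
  "num_implicit_merge_sketches", "num_explicit_merge_compressions",
  "skipped_small_rank_merges", "skipped_small_state_merges",
  "skipped_low_saving_merges", "exact_total_time_sec", "reference_available",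
  "num_method_params", "nmse", "total_time", "contraction_time", "emission_time",
  "speedup", "tau", "fixed_rank", "oversampling", "power_iter", "rank_policy",
  "leaf_tol", "merge_tol", "target_rank", "max_rank", "error_message"]

-- ===== PORT A =====
-- rows are Python dicts; iterating row.keys() is iterating the pairs' first components
-- (A's 'seen' guard makes any duplicate first components in the association list harmless).
def resolved_columns_py (rows : List (List (String × String))) : List String :=
  let ordered := RESULT_COLUMNS
  let st := rows.foldl
    (fun (st : PySem.Set String × List String) row =>
      row.foldl
        (fun st kv =>
          if PySem.Set.contains st.1 kv.1 then st
          else (PySem.Set.add st.1 kv.1, st.2 ++ [kv.1]))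
        st)
    (PySem.Set.ofList ordered, [])
  ordered ++ PySem.List.sorted st.2 (fun x => x) false

-- ===== PORT B =====
def resolved_columns_py_alt (rows : List (List (String × String))) : List String :=
  let base : PySem.Set String := PySem.Set.ofList RESULT_COLUMNS
  let keys := PySem.List.sorted (rows.flatMap (fun row => row.map Prod.fst)) (fun x => x) false
  let extras := keys.foldl
    (fun (extras : List String) k =>
      if !(PySem.Set.contains base k) && !(extras.getLast? == some k)
      then extras ++ [k] else extras) []
  RESULT_COLUMNS ++ extras

-- ===== PRECONDITION & SPEC =====
def Spec_resolved_columns_py (rows : List (List (String × String))) (out : List String) : Prop := out = resolved_columns_py_alt rows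
instance (rows : List (List (String × String))) (out : List String) : Decidable (Spec_resolved_columns_py rows out) := by unfold Spec_resolved_columns_py; infer_instance

-- ===== CLAIM (what is proved, stated in full; the proofs are below) =====
def Claim_equal_resolved_columns_py : Prop := ∀ (rows : List (List (String × String))), Dom_resolved_columns_py rows → Spec_resolved_columns_py rows (resolved_columns_py rows)

-- ===== LEMMAS AND PROOFS =====

-- A's loop step, over one key.
def pvStepA (st : PySem.Set String × List String) (k : String) : PySem.Set String × List String :=
  if PySem.Set.contains st.1 k then st else (PySem.Set.add st.1 k, st.2 ++ [k])

theorem pvFoldA_eq_flat (rows : List (List (String × String)))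
    (st : PySem.Set String × List String) :
    rows.foldl (fun st row => row.foldl (fun st kv => pvStepA st kv.1) st) st
      = (rows.flatMap (fun row => row.map Prod.fst)).foldl pvStepA st := by
  induction rows generalizing st with
  | nil => rfl
  | cons r rs ih =>
      rw [List.foldl_cons, List.flatMap_cons, List.foldl_append, ih]
      congr 1
      exact List.foldl_map.symm

-- membership in the extras accumulator after folding A's step over a key list
theorem pvFoldA_mem (ks : List String) (s : PySem.Set String) (e : List String) (x : String) :
    x ∈ (ks.foldl pvStepA (s, e)).2 ↔ x ∈ e ∨ (x ∈ ks ∧ x ∉ s) := by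
  induction ks generalizing s e with
  | nil => simp
  | cons k ks ih =>
      rw [List.foldl_cons]
      by_cases hk : PySem.Set.contains s k
      · have hk' : k ∈ s := List.contains_iff_mem.mp hk
        have hstep : pvStepA (s, e) k = (s, e) := by unfold pvStepA; rw [if_pos hk]
        rw [hstep, ih]
        simp only [List.mem_cons]
        constructor
        · rintro (h | ⟨h1, h2⟩)
          · exact Or.inl h
          · exact Or.inr ⟨Or.inr h1, h2⟩
        · rintro (h | ⟨h1 | h1, h2⟩)
          · exact Or.inl h
          · exact absurd (h1 ▸ hk') h2
          · exact Or.inr ⟨h1, h2⟩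
      · have hk' : k ∉ s := fun h => hk (List.contains_iff_mem.mpr h)
        have hadd : PySem.Set.add s k = s ++ [k] := by unfold PySem.Set.add; rw [if_neg hk]
        have hstep : pvStepA (s, e) k = (s ++ [k], e ++ [k]) := by
          unfold pvStepA; rw [if_neg hk, hadd]
        rw [hstep, ih]
        simp only [List.mem_append, List.mem_cons, List.not_mem_nil, or_false]
        constructor
        · rintro ((h | h) | ⟨h1, h2⟩)
          · exact Or.inl h
          · exact Or.inr ⟨Or.inl h, h ▸ hk'⟩
          · exact Or.inr ⟨Or.inr h1, fun hx => h2 (Or.inl hx)⟩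
        · rintro (h | ⟨h1 | h1, h2⟩)
          · exact Or.inl (Or.inl h)
          · exact Or.inl (Or.inr h1)
          · by_cases hxk : x = k
            · exact Or.inl (Or.inr hxk)
            · exact Or.inr ⟨h1, fun hx => (hx.elim h2 hxk)⟩

-- the extras accumulator stays duplicate-free (given e ⊆ s)
theorem pvFoldA_nodup (ks : List String) (s : PySem.Set String) (e : List String)
    (hsub : ∀ x ∈ e, x ∈ s) (hnd : e.Nodup) :
    (ks.foldl pvStepA (s, e)).2.Nodup := by
  induction ks generalizing s e with
  | nil => exact hnd
  | cons k ks ih =>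
      rw [List.foldl_cons]
      by_cases hk : PySem.Set.contains s k
      · have hstep : pvStepA (s, e) k = (s, e) := by unfold pvStepA; rw [if_pos hk]
        rw [hstep]; exact ih s e hsub hnd
      · have hk' : k ∉ s := fun h => hk (List.contains_iff_mem.mpr h)
        have hadd : PySem.Set.add s k = s ++ [k] := by unfold PySem.Set.add; rw [if_neg hk]
        have hstep : pvStepA (s, e) k = (s ++ [k], e ++ [k]) := by
          unfold pvStepA; rw [if_neg hk, hadd]
        rw [hstep]
        refine ih _ _ (fun x hx => ?_) ?_
        · rcases List.mem_append.mp hx with h | h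
          · exact List.mem_append.mpr (Or.inl (hsub x h))
          · exact List.mem_append.mpr (Or.inr h)
        · exact List.nodup_append.mpr ⟨hnd, List.nodup_singleton k,
            by simpa using fun x hx => fun (hxk : x = k) => hk' (hxk ▸ hsub x hx)⟩

-- B's loop step, over one sorted key.
def pvStepB (base : PySem.Set String) (extras : List String) (k : String) : List String :=
  if !(PySem.Set.contains base k) && !(extras.getLast? == some k)
  then extras ++ [k] else extras

-- in a strictly increasing list, an element bounding the list from above is the last one
theorem pvLast_of_max (acc : List String) (k : String)
    (hacc : acc.Pairwise (· < ·)) (hk : k ∈ acc) (hub : ∀ a ∈ acc, a ≤ k) :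
    acc.getLast? = some k := by
  induction acc with
  | nil => cases hk
  | cons a t ih =>
      rcases List.pairwise_cons.mp hacc with ⟨ha, ht⟩
      cases t with
      | nil => simp at hk ⊢; exact hk.symm
      | cons b u =>
          have hkt : k ∈ b :: u := by
            rcases List.mem_cons.mp hk with h | h
            · exfalso
              have hb : a < b := ha b (List.mem_cons_self)
              have := hub b (List.mem_cons_of_mem a List.mem_cons_self)
              exact absurd (h ▸ hb) (not_lt.mpr (h ▸ this))
            · exact h
          rw [List.getLast?_cons_cons]
          exact ih ht hkt (fun x hx => hub x (List.mem_cons_of_mem a hx))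

-- B's scan over a ≤-sorted key list: strictly increasing output, with exactly the
-- keys outside base (plus the accumulator) as members
theorem pvScanB (base : PySem.Set String) (ks : List String) (acc : List String)
    (hks : ks.Pairwise (· ≤ ·)) (hacc : acc.Pairwise (· < ·))
    (hle : ∀ a ∈ acc, ∀ k ∈ ks, a ≤ k) :
    (ks.foldl (pvStepB base) acc).Pairwise (· < ·) ∧
    (∀ x, x ∈ ks.foldl (pvStepB base) acc ↔ x ∈ acc ∨ (x ∈ ks ∧ x ∉ base)) := by
  induction ks generalizing acc with
  | nil => exact ⟨hacc, by simp⟩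
  | cons k ks ih =>
      rcases List.pairwise_cons.mp hks with ⟨hkle, hks'⟩
      rw [List.foldl_cons]
      by_cases hb : PySem.Set.contains base k
      · have hkb : k ∈ base := List.contains_iff_mem.mp hb
        have hstep : pvStepB base acc k = acc := by unfold pvStepB; simp [hkb]
        rw [hstep]
        obtain ⟨h1, h2⟩ := ih acc hks' hacc
          (fun a ha k' hk' => hle a ha k' (List.mem_cons_of_mem k hk'))
        refine ⟨h1, fun x => ?_⟩
        rw [h2 x]
        constructor
        · rintro (h | ⟨hx1, hx2⟩)
          · exact Or.inl h
          · exact Or.inr ⟨List.mem_cons_of_mem k hx1, hx2⟩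
        · rintro (h | ⟨hx1, hx2⟩)
          · exact Or.inl h
          · rcases List.mem_cons.mp hx1 with h | h
            · exact absurd (h ▸ hkb) hx2
            · exact Or.inr ⟨h, hx2⟩
      · by_cases hl : acc.getLast? = some k
        · have hstep : pvStepB base acc k = acc := by unfold pvStepB; simp [hl]
          rw [hstep]
          have hkacc : k ∈ acc := List.mem_of_getLast? hl
          obtain ⟨h1, h2⟩ := ih acc hks' hacc
            (fun a ha k' hk' => hle a ha k' (List.mem_cons_of_mem k hk'))
          refine ⟨h1, fun x => ?_⟩
          rw [h2 x]
          constructor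
          · rintro (h | ⟨hx1, hx2⟩)
            · exact Or.inl h
            · exact Or.inr ⟨List.mem_cons_of_mem k hx1, hx2⟩
          · rintro (h | ⟨hx1, hx2⟩)
            · exact Or.inl h
            · rcases List.mem_cons.mp hx1 with h | h
              · exact Or.inl (h ▸ hkacc)
              · exact Or.inr ⟨h, hx2⟩
        · have hkb : k ∉ base := fun h => hb (List.contains_iff_mem.mpr h)
          have hstep : pvStepB base acc k = acc ++ [k] := by
            unfold pvStepB; simp [hl]; exact hkb
          rw [hstep]
          have hltk : ∀ a ∈ acc, a < k := by
            intro a ha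
            have hak : a ≤ k := hle a ha k List.mem_cons_self
            rcases lt_or_eq_of_le hak with h | h
            · exact h
            · exfalso
              exact hl (pvLast_of_max acc k hacc (h ▸ ha)
                (fun a' ha' => hle a' ha' k List.mem_cons_self))
          have hacc' : (acc ++ [k]).Pairwise (· < ·) := by
            rw [List.pairwise_append]
            exact ⟨hacc, List.pairwise_singleton _ _,
              fun a ha b hb' => (List.mem_singleton.mp hb') ▸ hltk a ha⟩
          have hle' : ∀ a ∈ acc ++ [k], ∀ k' ∈ ks, a ≤ k' := by
            intro a ha k' hk'
            rcases List.mem_append.mp ha with h | h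
            · exact hle a h k' (List.mem_cons_of_mem k hk')
            · exact (List.mem_singleton.mp h) ▸ hkle k' hk'
          obtain ⟨h1, h2⟩ := ih (acc ++ [k]) hks' hacc' hle'
          refine ⟨h1, fun x => ?_⟩
          rw [h2 x]
          simp only [List.mem_append, List.mem_cons,
            List.not_mem_nil, or_false]
          constructor
          · rintro ((h | h) | ⟨hx1, hx2⟩)
            · exact Or.inl h
            · exact Or.inr ⟨Or.inl h, h ▸ hkb⟩
            · exact Or.inr ⟨Or.inr hx1, hx2⟩
          · rintro (h | ⟨hx1 | hx1, hx2⟩)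
            · exact Or.inl (Or.inl h)
            · exact Or.inl (Or.inr hx1)
            · exact Or.inr ⟨hx1, hx2⟩

-- ===== VERDICT (by name: the statement is the Claim_ definition above) =====
set_option maxRecDepth 8192 in
theorem resolved_columns_py_spec : Claim_equal_resolved_columns_py := by
  intro rows _
  unfold Spec_resolved_columns_py resolved_columns_py resolved_columns_py_alt
  simp only []
  set ks := rows.flatMap (fun row => row.map Prod.fst) with hks
  have hfold : rows.foldl
      (fun (st : PySem.Set String × List String) row =>
        row.foldl (fun st kv =>
          if PySem.Set.contains st.1 kv.1 then st
          else (PySem.Set.add st.1 kv.1, st.2 ++ [kv.1])) st)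
      (PySem.Set.ofList RESULT_COLUMNS, []) = ks.foldl pvStepA (PySem.Set.ofList RESULT_COLUMNS, []) := by
    rw [← pvFoldA_eq_flat]; rfl
  rw [hfold]
  congr 1
  -- A's extras, sorted, vs B's scan of the sorted key list
  set e := (ks.foldl pvStepA (PySem.Set.ofList RESULT_COLUMNS, [])).2 with he
  set sks := PySem.List.sorted ks (fun x => x) false with hsks
  set scan := sks.foldl (pvStepB (PySem.Set.ofList RESULT_COLUMNS)) [] with hscan
  have hsortks : sks.Pairwise (· ≤ ·) := PySem.List.sorted_pairwise ks (fun x => x)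
  obtain ⟨hpw, hmem⟩ := pvScanB (PySem.Set.ofList RESULT_COLUMNS) sks []
    hsortks (List.Pairwise.nil) (by simp)
  have hemem : ∀ x, x ∈ e ↔ x ∈ ks ∧ x ∉ PySem.Set.ofList RESULT_COLUMNS := by
    intro x
    rw [he, pvFoldA_mem]
    simp
  have hnd_e : e.Nodup := pvFoldA_nodup ks _ [] (by simp) List.nodup_nil
  have hnd_scan : scan.Nodup := hpw.nodup
  have hperm : scan.Perm e := by
    rw [List.perm_ext_iff_of_nodup hnd_scan hnd_e]
    intro x
    rw [hmem x, hemem x]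
    simp only [List.not_mem_nil, false_or]
    rw [PySem.List.mem_sorted]
  exact PySem.List.sorted_eq_of_perm_of_pairwise_lt e scan (fun x => x) hperm hpw
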